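-- pv_equiv track=rewrite | github.com/cpe202fall2019/lab1-caseymhansen | lab1.py | max_list_iter
-- ===== SOURCE A (Python) =====
-- def max_list_iter(int_list):  # must use iteration not recursion
--    """finds the max of a list of numbers and returns the value (not the index)
--    If int_list is empty, returns None. If list is None, raises ValueError"""
--    if int_list == None:
--       raise ValueError
--    if int_list == []:
--       return None
--    max_val = int_list[0]
--    for i in range(len(int_list)):
--       if int_list[i] > max_val:
--          max_val = int_list[i]
--    return max_val
-- ===== SOURCE B (Python) =====
-- def max_list_iter(int_list):
--     """finds the max of a list of numbers and returns the value (not the index)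
--     If int_list is empty, returns None. If list is None, raises ValueError"""
--     if int_list == None:
--         raise ValueError
--     if int_list == []:
--         return None
--     return sorted(int_list)[-1]
-- ===== Notes on version B (the rewrite author's own statement) =====
-- stated objective: alternative
-- what changed: Replaces the indexed scanning loop that tracks a running maximum with sorting the list and taking the last element.
import Mathlib
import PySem

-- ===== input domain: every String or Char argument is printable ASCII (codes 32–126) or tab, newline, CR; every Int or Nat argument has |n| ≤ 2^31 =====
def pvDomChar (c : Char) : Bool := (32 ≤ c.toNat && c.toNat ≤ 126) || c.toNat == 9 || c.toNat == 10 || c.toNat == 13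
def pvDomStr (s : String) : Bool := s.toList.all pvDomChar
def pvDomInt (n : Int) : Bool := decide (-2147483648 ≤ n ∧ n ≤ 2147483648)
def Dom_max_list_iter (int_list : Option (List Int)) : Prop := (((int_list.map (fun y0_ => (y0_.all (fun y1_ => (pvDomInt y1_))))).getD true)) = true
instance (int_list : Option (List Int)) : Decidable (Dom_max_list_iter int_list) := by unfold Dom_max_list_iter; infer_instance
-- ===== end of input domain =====

-- B replaces A's indexed running-maximum loop by sorting and taking the last element (alternative algorithm, same values).

-- ===== PORT A =====
def max_list_iter (int_list : Option (List Int)) : Option Int :=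
  match int_list with
  | none => none        -- A raises ValueError here; excluded by Pre_max_list_iter
  | some l =>
    if l = [] then none
    else
      some ((PySem.List.pyRange 0 (PySem.List.len l) 1).foldl
        (fun max_val i =>
          let x := PySem.List.pyGetD l i 0
          if max_val < x then x else max_val)
        (PySem.List.pyGetD l 0 0))

-- ===== PORT B =====
def max_list_iter_alt (int_list : Option (List Int)) : Option Int :=
  match int_list with
  | none => none        -- B raises ValueError here; excluded by Pre_max_list_iter
  | some l =>
    if l = [] then none
    else PySem.List.pyGet? (PySem.List.sorted l (fun x => x) false) (-1)

-- ===== PRECONDITION & SPEC =====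
-- Pre_ excludes exactly int_list = None, where both A and B raise ValueError.
def Pre_max_list_iter (int_list : Option (List Int)) : Prop := int_list ≠ none
instance (int_list : Option (List Int)) : Decidable (Pre_max_list_iter int_list) := by unfold Pre_max_list_iter; infer_instance
def pvWitness_max_list_iter : Option (List Int) := some [3, 1, 4, 1, 5]

def Spec_max_list_iter (int_list : Option (List Int)) (out : Option Int) : Prop := out = max_list_iter_alt int_list
instance (int_list : Option (List Int)) (out : Option Int) : Decidable (Spec_max_list_iter int_list out) := by unfold Spec_max_list_iter; infer_instance

-- ===== CLAIM (what is proved, stated in full; the proofs are below) =====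
def Claim_equal_max_list_iter : Prop := ∀ (int_list : Option (List Int)), Dom_max_list_iter int_list → Pre_max_list_iter int_list → Spec_max_list_iter int_list (max_list_iter int_list)

-- ===== LEMMAS AND PROOFS =====

-- an accumulating max-fold lands on a member of h :: t
lemma foldl_max_mem (t : List Int) (h : Int) : t.foldl max h ∈ h :: t := by
  induction t generalizing h with
  | nil => simp
  | cons x xs ih =>
    simp only [List.foldl_cons]
    have hm := ih (max h x)
    rcases List.mem_cons.mp hm with hm | hm
    · rw [hm]
      rcases max_choice h x with he | he <;> simp [he]
    · simp [hm]

-- an accumulating max-fold bounds the seed and every element folded in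
lemma le_foldl_max (t : List Int) (h : Int) :
    h ≤ t.foldl max h ∧ ∀ x ∈ t, x ≤ t.foldl max h := by
  induction t generalizing h with
  | nil => simp
  | cons y ys ih =>
    obtain ⟨h1, h2⟩ := ih (max h y)
    refine ⟨le_trans (le_max_left _ _) h1, ?_⟩
    intro x hx
    rcases List.mem_cons.mp hx with rfl | hx
    · exact le_trans (le_max_right _ _) h1
    · exact h2 x hx

-- the last element of a (· ≤ ·)-pairwise list bounds all its members
lemma pairwise_le_getLast (s : List Int) (hp : s.Pairwise (· ≤ ·)) (hne : s ≠ []) :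
    ∀ x ∈ s, x ≤ s.getLast hne := by
  induction s with
  | nil => exact absurd rfl hne
  | cons y ys ih =>
    intro x hx
    rcases List.pairwise_cons.mp hp with ⟨hy, hys⟩
    by_cases hys0 : ys = []
    · subst hys0; simp at hx; simp [hx]
    · rw [List.getLast_cons hys0]
      rcases List.mem_cons.mp hx with rfl | hx
      · exact hy _ (List.getLast_mem hys0)
      · exact ih hys hys0 x hx

-- ===== VERDICT (by name: the statement is the Claim_ definition above) =====
theorem max_list_iter_spec : Claim_equal_max_list_iter := by
  intro int_list _ hpre
  unfold Spec_max_list_iter max_list_iter max_list_iter_alt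
  match int_list with
  | none => exact absurd rfl hpre
  | some l =>
    match l with
    | [] => simp
    | h :: t =>
      simp only [reduceCtorEq, reduceIte]
      -- A's side: the index loop is a fold over the list
      rw [PySem.List.foldl_pyRange_zero_pyGetD (h :: t) 0
        (fun max_val x => if max_val < x then x else max_val) (PySem.List.pyGetD (h :: t) 0 0)]
      have hinit : PySem.List.pyGetD (h :: t) 0 0 = h := by
        simp [PySem.List.pyGetD, PySem.List.pyIdx?, PySem.List.pyGet?]
      rw [hinit]
      -- the fold body is max
      have hfold : (h :: t).foldl (fun max_val x => if max_val < x then x else max_val) h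
          = (h :: t).foldl max h := by
        apply List.foldl_ext
        intro a b _
        rcases lt_trichotomy b a with hc | hc | hc
        · simp [max_def, not_lt.mpr (le_of_lt hc), not_le.mpr hc]
        · subst hc; simp
        · simp [hc, le_of_lt hc]
      rw [hfold]
      have hm : (h :: t).foldl max h = t.foldl max h := by
        simp [List.foldl_cons]
      rw [hm]
      -- B's side: last element of the sorted list
      have hsne : PySem.List.sorted (h :: t) (fun x => x) false ≠ [] := by
        intro hc
        have := (PySem.List.sorted_eq_nil_iff (h :: t) (fun x => x) false).mp hc
        simp at this
      rw [PySem.List.pyGet?_neg_one, List.getLast?_eq_some_getLast hsne]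
      -- both are THE maximum of h :: t
      set s := PySem.List.sorted (h :: t) (fun x => x) false with hs
      have hperm : s.Perm (h :: t) := PySem.List.sorted_perm _ _ _
      have hpw : s.Pairwise (· ≤ ·) := by
        have := PySem.List.sorted_pairwise (h :: t) (fun x => x)
        simpa using this
      have hg_mem : s.getLast hsne ∈ h :: t := hperm.mem_iff.mp (List.getLast_mem hsne)
      have hg_max : ∀ x ∈ h :: t, x ≤ s.getLast hsne := by
        intro x hx
        exact pairwise_le_getLast s hpw hsne x (hperm.mem_iff.mpr hx)
      have hf_mem : t.foldl max h ∈ h :: t := foldl_max_mem t h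
      obtain ⟨hf1, hf2⟩ := le_foldl_max t h
      have hf_max : ∀ x ∈ h :: t, x ≤ t.foldl max h := by
        intro x hx
        rcases List.mem_cons.mp hx with rfl | hx
        · exact hf1
        · exact hf2 x hx
      have : t.foldl max h = s.getLast hsne :=
        le_antisymm (hg_max _ hf_mem) (hf_max _ hg_mem)
      rw [this]
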